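-- pv_equiv track=rewrite | github.com/KrisAesoey/AtomicOntologyLearning | src/AtomicSplitter.py | correct_individuals
-- ===== SOURCE A (Python) =====
-- def correct_individuals(inference):
--     words = inference.lower().replace('.', "").split()
--     corrected_inference = []
--     i = 0
--     while i < len(words):
--         if words[i] == "person":
--             if i != len(words) - 1:
--                 if words[i+1] == 'x':
--                     corrected_inference.append("PersonX")
--                     i += 2
--                     continue
--                 elif words[i+1] == 'y':
--                     corrected_inference.append("PersonY")
--                     i += 2
--                     continue
--                 elif words[i+1] == 'z':
--                     corrected_inference.append("PersonZ")
--                     i += 2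
--                     continue
--                 elif words[i+1] == 'z':
--                     corrected_inference.append("PersonZ")
--                     i += 2
--                     continue
--                 elif words[i+1] == "x's":
--                     corrected_inference.append("PersonX's")
--                     i += 2
--                     continue
--                 elif words[i+1] == "y's":
--                     corrected_inference.append("PersonY's")
--                     i += 2
--                     continue
--                 elif words[i+1] == "z's":
--                     corrected_inference.append("PersonZ's")
--                     i += 2
--                     continue
--         elif words[i] == "personx":
--             corrected_inference.append("PersonX")
--         elif words[i] == "persony":
--             corrected_inference.append("PersonY")
--         elif words[i] == "personz":
--             corrected_inference.append("PersonZ")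
--         elif words[i] == 'x':
--             corrected_inference.append("PersonX")
--         elif words[i] == 'y':
--             corrected_inference.append("PersonY")
--         elif words[i] == 'z':
--             corrected_inference.append("PersonZ")
--         elif words[i] == "x's":
--             corrected_inference.append("PersonX's")
--         elif words[i] == "y's":
--             corrected_inference.append("PersonY's")
--         elif words[i] == "z's":
--             corrected_inference.append("PersonZ's")
--         else:
--             corrected_inference.append(words[i])
--         i += 1
--
--     return " ".join(corrected_inference)
-- ===== SOURCE B (Python) =====
-- _REPL = {
--     "personx": "PersonX", "persony": "PersonY", "personz": "PersonZ",
--     "x": "PersonX", "y": "PersonY", "z": "PersonZ",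
--     "x's": "PersonX's", "y's": "PersonY's", "z's": "PersonZ's",
-- }
--
-- def correct_individuals(inference):
--     words = inference.lower().replace('.', "").split()
--     return " ".join(_REPL.get(w, w) for w in words if w != "person")
-- ===== Notes on version B (the rewrite author's own statement) =====
-- stated objective: simpler
-- what changed: Replaces the index-based while-loop lookahead state machine (i+=2 consumption of 'person'+pronoun pairs) with a stateless filter that drops every 'person' token followed by a dict-lookup map over the remaining tokens.
import Mathlib
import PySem

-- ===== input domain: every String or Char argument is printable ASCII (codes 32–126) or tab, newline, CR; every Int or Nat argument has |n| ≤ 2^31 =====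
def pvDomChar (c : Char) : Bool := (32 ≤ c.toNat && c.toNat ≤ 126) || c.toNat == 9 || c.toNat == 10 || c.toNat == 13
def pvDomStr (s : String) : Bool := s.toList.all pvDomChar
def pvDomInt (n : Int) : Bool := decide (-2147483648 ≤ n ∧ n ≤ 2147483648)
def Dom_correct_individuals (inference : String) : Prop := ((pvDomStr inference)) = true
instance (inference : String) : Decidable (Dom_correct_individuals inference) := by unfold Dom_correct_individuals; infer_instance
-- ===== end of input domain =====

-- B replaces A's index-based while loop with two-token lookahead by a stateless
-- filter (drop "person") + dict-lookup map; objective: simpler. Return value only.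

-- ===== PORT A =====
-- The while loop over index i, viewed on the suffix words[i:]; i+=2 drops two
-- elements, i+=1 drops one — a direct transliteration of A's state machine.
def pvLoopA : List String → List String
  | [] => []
  | w :: rest =>
    if w = "person" then
      match rest with
      | [] => pvLoopA []                       -- i = len-1: nothing appended
      | n :: rest' =>
        if n = "x" then "PersonX" :: pvLoopA rest'
        else if n = "y" then "PersonY" :: pvLoopA rest'
        else if n = "z" then "PersonZ" :: pvLoopA rest'
        else if n = "x's" then "PersonX's" :: pvLoopA rest'
        else if n = "y's" then "PersonY's" :: pvLoopA rest'
        else if n = "z's" then "PersonZ's" :: pvLoopA rest'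
        else pvLoopA (n :: rest')              -- inner chain fell through: nothing appended
    else if w = "personx" then "PersonX" :: pvLoopA rest
    else if w = "persony" then "PersonY" :: pvLoopA rest
    else if w = "personz" then "PersonZ" :: pvLoopA rest
    else if w = "x" then "PersonX" :: pvLoopA rest
    else if w = "y" then "PersonY" :: pvLoopA rest
    else if w = "z" then "PersonZ" :: pvLoopA rest
    else if w = "x's" then "PersonX's" :: pvLoopA rest
    else if w = "y's" then "PersonY's" :: pvLoopA rest
    else if w = "z's" then "PersonZ's" :: pvLoopA rest
    else w :: pvLoopA rest

def correct_individuals (inference : String) : String :=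
  let words := PySem.Str.split₀ (PySem.Str.replace (PySem.Str.lower inference) "." "")
  PySem.Str.join " " (pvLoopA words)

-- ===== PORT B =====
-- _REPL.get(w, w)
def pvRepl (w : String) : String :=
  (PySem.Dict.ofList [("personx", "PersonX"), ("persony", "PersonY"), ("personz", "PersonZ"),
    ("x", "PersonX"), ("y", "PersonY"), ("z", "PersonZ"),
    ("x's", "PersonX's"), ("y's", "PersonY's"), ("z's", "PersonZ's")]).getD w w

def correct_individuals_alt (inference : String) : String :=
  let words := PySem.Str.split₀ (PySem.Str.replace (PySem.Str.lower inference) "." "")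
  PySem.Str.join " " ((words.filter (fun w => w ≠ "person")).map pvRepl)

-- ===== PRECONDITION & SPEC =====
def Spec_correct_individuals (inference : String) (out : String) : Prop := out = correct_individuals_alt inference
instance (inference : String) (out : String) : Decidable (Spec_correct_individuals inference out) := by unfold Spec_correct_individuals; infer_instance

-- ===== CLAIM (what is proved, stated in full; the proofs are below) =====
def Claim_equal_correct_individuals : Prop := ∀ (inference : String), Dom_correct_individuals inference → Spec_correct_individuals inference (correct_individuals inference)

-- ===== LEMMAS AND PROOFS =====
theorem pvRepl_personx : pvRepl "personx" = "PersonX" := by decide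
theorem pvRepl_persony : pvRepl "persony" = "PersonY" := by decide
theorem pvRepl_personz : pvRepl "personz" = "PersonZ" := by decide
theorem pvRepl_x : pvRepl "x" = "PersonX" := by decide
theorem pvRepl_y : pvRepl "y" = "PersonY" := by decide
theorem pvRepl_z : pvRepl "z" = "PersonZ" := by decide
theorem pvRepl_xs : pvRepl "x's" = "PersonX's" := by decide
theorem pvRepl_ys : pvRepl "y's" = "PersonY's" := by decide
theorem pvRepl_zs : pvRepl "z's" = "PersonZ's" := by decide

theorem pvRepl_ne (n : String) (h1 : ¬ n = "personx") (h2 : ¬ n = "persony") (h3 : ¬ n = "personz")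
    (h4 : ¬ n = "x") (h5 : ¬ n = "y") (h6 : ¬ n = "z")
    (h7 : ¬ n = "x's") (h8 : ¬ n = "y's") (h9 : ¬ n = "z's") : pvRepl n = n := by
  simp [pvRepl, PySem.Dict.ofList, PySem.Dict.getD, PySem.Dict.get?, PySem.Dict.update,
    PySem.Dict.empty, PySem.Dict.insert, List.find?,
    beq_eq_false_iff_ne.mpr (Ne.symm h1), beq_eq_false_iff_ne.mpr (Ne.symm h2),
    beq_eq_false_iff_ne.mpr (Ne.symm h3), beq_eq_false_iff_ne.mpr (Ne.symm h4),
    beq_eq_false_iff_ne.mpr (Ne.symm h5), beq_eq_false_iff_ne.mpr (Ne.symm h6),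
    beq_eq_false_iff_ne.mpr (Ne.symm h7), beq_eq_false_iff_ne.mpr (Ne.symm h8),
    beq_eq_false_iff_ne.mpr (Ne.symm h9)]

theorem pvLoopA_eq (ws : List String) :
    pvLoopA ws = (ws.filter (fun w => w ≠ "person")).map pvRepl := by
  fun_induction pvLoopA ws <;>
    simp_all [pvRepl_personx, pvRepl_persony, pvRepl_personz, pvRepl_x, pvRepl_y, pvRepl_z,
      pvRepl_xs, pvRepl_ys, pvRepl_zs, pvRepl_ne]

-- ===== VERDICT (by name: the statement is the Claim_ definition above) =====
theorem correct_individuals_spec : Claim_equal_correct_individuals := by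
  intro inference _
  unfold Spec_correct_individuals correct_individuals correct_individuals_alt
  simp [pvLoopA_eq]
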